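-- pv_equiv track=rewrite | github.com/galid1/Algorithm | python/baekjoon/2.algorithm/string/4889.안정적인 문자열.py | solve
-- ===== SOURCE A (Python) =====
-- def solve(s):
--     stack = []
--     o_cnt, c_cnt = 0, 0
--
--     for b in s:
--         if not stack:
--             stack.append(b)
--             if b == "{":
--                 o_cnt += 1
--             elif b == "}":
--                 c_cnt += 1
--             continue
--
--         if b == "{":
--             stack.append(b)
--             o_cnt += 1
--
--         elif b == "}":
--             if stack[-1] == "{":
--                 o_cnt -= 1
--                 stack.pop()
--                 continue
--
--             else:
--                 stack.append(b)
--                 c_cnt += 1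
--
--     return o_cnt // 2 + o_cnt % 2 + c_cnt // 2 + c_cnt % 2
-- ===== SOURCE B (Python) =====
-- def solve(s):
--     prefixes = [0]
--     for ch in s:
--         if ch == "{":
--             prefixes.append(prefixes[-1] + 1)
--         elif ch == "}":
--             prefixes.append(prefixes[-1] - 1)
--     low = min(prefixes)
--     close_bad = -low
--     open_bad = prefixes[-1] - low
--     return (open_bad + 1) // 2 + (close_bad + 1) // 2
-- ===== Notes on version B (the rewrite author's own statement) =====
-- stated objective: alternative
-- what changed: B drops A's cancellation stack entirely: it builds the list of prefix balances of the brace string in one staged pass, then reads the answer off a closed formula -- unmatched closes = -min(prefixes), unmatched opens = prefixes[-1] - min(prefixes), result = ceil of each half.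
import Mathlib
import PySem

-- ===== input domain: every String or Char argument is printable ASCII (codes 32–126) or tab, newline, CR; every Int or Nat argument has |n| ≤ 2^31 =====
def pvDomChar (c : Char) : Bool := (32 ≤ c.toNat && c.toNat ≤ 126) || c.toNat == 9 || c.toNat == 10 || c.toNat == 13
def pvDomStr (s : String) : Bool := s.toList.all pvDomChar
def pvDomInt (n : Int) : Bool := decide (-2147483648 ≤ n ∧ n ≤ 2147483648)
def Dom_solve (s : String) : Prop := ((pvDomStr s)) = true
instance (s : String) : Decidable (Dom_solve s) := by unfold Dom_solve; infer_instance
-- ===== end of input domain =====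

-- B replaces A's cancellation stack by a prefix-balance list and a closed formula
-- (unmatched closes = -min(prefixes), unmatched opens = last(prefixes) - min(prefixes)); same cost, no stack simulation.

-- ===== PORT A =====
-- A's loop state: (stack, o_cnt, c_cnt); Python's stack[-1] is the head here (push = cons, pop = tail).
def stepA (acc : List Char × Int × Int) (b : Char) : List Char × Int × Int :=
  match acc with
  | (stack, o, c) =>
    match stack with
    | [] =>
      if b = '{' then ([b], o + 1, c)
      else if b = '}' then ([b], o, c + 1)
      else ([b], o, c)
    | t :: rest =>
      if b = '{' then (b :: t :: rest, o + 1, c)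
      else if b = '}' then
        if t = '{' then (rest, o - 1, c)
        else (b :: t :: rest, o, c + 1)
      else (t :: rest, o, c)

def solve (s : String) : Int :=
  let st := s.toList.foldl stepA ([], 0, 0)
  PySem.Int.floordiv st.2.1 2 + PySem.Int.mod st.2.1 2 +
    PySem.Int.floordiv st.2.2 2 + PySem.Int.mod st.2.2 2

-- ===== PORT B =====
-- Source B's loop body: append prefixes[-1] ± 1 on a brace (prefixes is never empty, so the getD 0
-- default of prefixes[-1] is unreachable; it only makes the port total).
def stepB (acc : List Int) (ch : Char) : List Int :=
  if ch = '{' then acc ++ [(PySem.List.pyGet? acc (-1)).getD 0 + 1]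
  else if ch = '}' then acc ++ [(PySem.List.pyGet? acc (-1)).getD 0 - 1]
  else acc

def solve_alt (s : String) : Int :=
  let prefixes := s.toList.foldl stepB [0]
  -- min(prefixes) and prefixes[-1]: the list is nonempty, the getD 0 defaults are unreachable
  let low := (PySem.List.min? prefixes (fun x => x)).getD 0
  let close_bad := -low
  let open_bad := (PySem.List.pyGet? prefixes (-1)).getD 0 - low
  PySem.Int.floordiv (open_bad + 1) 2 + PySem.Int.floordiv (close_bad + 1) 2

-- ===== PRECONDITION & SPEC =====
def Spec_solve (s : String) (out : Int) : Prop := out = solve_alt s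
instance (s : String) (out : Int) : Decidable (Spec_solve s out) := by unfold Spec_solve; infer_instance

-- ===== CLAIM (what is proved, stated in full; the proofs are below) =====
def Claim_equal_solve : Prop := ∀ (s : String), Dom_solve s → Spec_solve s (solve s)

-- ===== LEMMAS AND PROOFS =====

-- reference counter run over Nat state (number of unmatched opens / closes so far)
def runN : List Char → Nat → Nat → Nat × Nat
  | [], op, cl => (op, cl)
  | b :: l, op, cl =>
    if b = '{' then runN l (op + 1) cl
    else if b = '}' then
      if 0 < op then runN l (op - 1) cl else runN l op (cl + 1)
    else runN l op cl

-- total brace balance and minimum prefix balance of a suffix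
def tot : List Char → Int
  | [] => 0
  | b :: l => (if b = '{' then 1 else if b = '}' then -1 else 0) + tot l

def mn : List Char → Int
  | [] => 0
  | b :: l =>
    if b = '{' then min 0 (1 + mn l)
    else if b = '}' then min 0 (-1 + mn l)
    else mn l

theorem mn_nonpos (l : List Char) : mn l ≤ 0 := by
  cases l with
  | nil => simp [mn]
  | cons b l =>
    simp only [mn]
    split_ifs <;> first | exact min_le_left _ _ | exact mn_nonpos l

-- the counter run in terms of tot/mn
theorem runN_char (l : List Char) (op cl : Nat) :
    ((runN l op cl).1 : Int) = op + tot l + max 0 (-((op : Int) + mn l)) ∧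
      ((runN l op cl).2 : Int) = cl + max 0 (-((op : Int) + mn l)) := by
  induction l generalizing op cl with
  | nil => simp [runN, tot, mn]
  | cons b l ih =>
    by_cases hb : b = '{'
    · have key := ih (op + 1) cl
      simp only [runN, tot, mn, hb, if_pos rfl, reduceIte] at *
      push_cast at key ⊢
      omega
    · by_cases hb2 : b = '}'
      · by_cases hop : 0 < op
        · have key := ih (op - 1) cl
          simp only [runN, tot, mn, hb, hb2, reduceIte, if_pos hop] at *
          push_cast [hop] at key ⊢
          omega
        · have hop0 : op = 0 := by omega
          subst hop0
          have key := ih 0 (cl + 1)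
          have hmn := mn_nonpos l
          simp only [runN, tot, mn, hb, hb2, reduceIte] at *
          push_cast at key ⊢
          omega
      · have key := ih op cl
        simp only [runN, tot, mn, hb, hb2, reduceIte] at *
        omega

-- A's fold in terms of runN: the stack is always '{'*op followed by non-'{' junk
theorem lemA (l : List Char) (op cl : Nat) (rest : List Char)
    (hrest : ∀ x ∈ rest, x ≠ '{') :
    (l.foldl stepA (List.replicate op '{' ++ rest, (op : Int), (cl : Int))).2 =
      (((runN l op cl).1 : Int), ((runN l op cl).2 : Int)) := by
  induction l generalizing op cl rest with
  | nil => simp [runN]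
  | cons b l ih =>
    rw [List.foldl_cons]
    by_cases hb : b = '{'
    · have hstep : stepA (List.replicate op '{' ++ rest, (op : Int), (cl : Int)) b =
          (List.replicate (op + 1) '{' ++ rest, (op : Int) + 1, (cl : Int)) := by
        cases op with
        | zero =>
          cases rest with
          | nil => simp [stepA, hb]
          | cons r rs => simp [stepA, hb, List.replicate_succ]
        | succ n => simp [stepA, hb, List.replicate_succ]
      rw [hstep]
      have key := ih (op + 1) cl rest hrest
      push_cast at key
      simpa [runN, hb] using key
    · by_cases hb2 : b = '}'
      · cases op with
        | zero =>
          cases rest with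
          | nil =>
            have hstep : stepA (List.replicate 0 '{' ++ ([] : List Char), ((0 : Nat) : Int), (cl : Int)) b =
                (List.replicate 0 '{' ++ ['}'], ((0 : Nat) : Int), (cl : Int) + 1) := by
              simp [stepA, hb, hb2]
            rw [hstep]
            have key := ih 0 (cl + 1) ['}'] (by simp)
            push_cast at key
            simpa [runN, hb, hb2] using key
          | cons r rs =>
            have hr : r ≠ '{' := hrest r (by simp)
            have hstep : stepA (List.replicate 0 '{' ++ (r :: rs), ((0 : Nat) : Int), (cl : Int)) b =
                (List.replicate 0 '{' ++ ('}' :: r :: rs), ((0 : Nat) : Int), (cl : Int) + 1) := by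
              simp [stepA, hb, hb2, hr]
            rw [hstep]
            have key := ih 0 (cl + 1) ('}' :: r :: rs) (by
              intro x hx
              simp only [List.mem_cons] at hx
              rcases hx with rfl | hx
              · simp
              · exact hrest x (List.mem_cons.mpr hx))
            push_cast at key
            simpa [runN, hb, hb2] using key
        | succ n =>
          have hstep : stepA (List.replicate (n + 1) '{' ++ rest, ((n + 1 : Nat) : Int), (cl : Int)) b =
              (List.replicate n '{' ++ rest, ((n : Nat) : Int), (cl : Int)) := by
            have h1 : ((n + 1 : Nat) : Int) - 1 = ((n : Nat) : Int) := by push_cast; ring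
            simp [stepA, hb2, List.replicate_succ, h1]
          rw [hstep]
          simpa [runN, hb, hb2] using ih n cl rest hrest
      · cases op with
        | zero =>
          cases rest with
          | nil =>
            have hstep : stepA (List.replicate 0 '{' ++ ([] : List Char), ((0 : Nat) : Int), (cl : Int)) b =
                (List.replicate 0 '{' ++ [b], ((0 : Nat) : Int), (cl : Int)) := by
              simp [stepA, hb, hb2]
            rw [hstep]
            simpa [runN, hb, hb2] using ih 0 cl [b] (by simpa using hb)
          | cons r rs =>
            have hstep : stepA (List.replicate 0 '{' ++ (r :: rs), ((0 : Nat) : Int), (cl : Int)) b =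
                (List.replicate 0 '{' ++ (r :: rs), ((0 : Nat) : Int), (cl : Int)) := by
              simp [stepA, hb, hb2]
            rw [hstep]
            simpa [runN, hb, hb2] using ih 0 cl (r :: rs) hrest
        | succ n =>
          have hstep : stepA (List.replicate (n + 1) '{' ++ rest, ((n + 1 : Nat) : Int), (cl : Int)) b =
              (List.replicate (n + 1) '{' ++ rest, ((n + 1 : Nat) : Int), (cl : Int)) := by
            simp [stepA, hb, hb2, List.replicate_succ]
          rw [hstep]
          simpa [runN, hb, hb2] using ih (n + 1) cl rest hrest

-- the appended part of B's prefix list, starting from running balance x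
def prefList : Int → List Char → List Int
  | x, [] => []
  | x, b :: l =>
    if b = '{' then (x + 1) :: prefList (x + 1) l
    else if b = '}' then (x - 1) :: prefList (x - 1) l
    else prefList x l

theorem foldB (l : List Char) (acc : List Int) (x : Int) :
    l.foldl stepB (acc ++ [x]) = acc ++ [x] ++ prefList x l := by
  induction l generalizing acc x with
  | nil => simp [prefList]
  | cons b l ih =>
    rw [List.foldl_cons]
    by_cases hb : b = '{'
    · have hstep : stepB (acc ++ [x]) b = (acc ++ [x]) ++ [x + 1] := by
        simp [stepB, hb, PySem.List.pyGet?_neg_one_append_singleton]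
      rw [hstep]
      have key := ih (acc ++ [x]) (x + 1)
      simpa [prefList, hb] using key
    · by_cases hb2 : b = '}'
      · have hstep : stepB (acc ++ [x]) b = (acc ++ [x]) ++ [x - 1] := by
          simp [stepB, hb, hb2, PySem.List.pyGet?_neg_one_append_singleton]
        rw [hstep]
        have key := ih (acc ++ [x]) (x - 1)
        simpa [prefList, hb, hb2] using key
      · have hstep : stepB (acc ++ [x]) b = acc ++ [x] := by
          simp [stepB, hb, hb2]
        rw [hstep]
        simpa [prefList, hb, hb2] using ih acc x

theorem lastPref (l : List Char) (x : Int) (acc : List Int) :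
    PySem.List.pyGet? (acc ++ x :: prefList x l) (-1) = some (x + tot l) := by
  induction l generalizing x acc with
  | nil =>
    have h := PySem.List.pyGet?_neg_one_append_singleton (xs := acc) (x := x)
    simpa [prefList, tot] using h
  | cons b l ih =>
    by_cases hb : b = '{'
    · subst hb
      have key := ih (x + 1) (acc ++ [x])
      have harr : acc ++ x :: (x + 1) :: prefList (x + 1) l =
          (acc ++ [x]) ++ (x + 1) :: prefList (x + 1) l := by simp
      simp only [prefList, tot, reduceIte, harr, key, Char.reduceEq]
      ring_nf
    · by_cases hb2 : b = '}'
      · subst hb2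
        have key := ih (x - 1) (acc ++ [x])
        have harr : acc ++ x :: (x - 1) :: prefList (x - 1) l =
            (acc ++ [x]) ++ (x - 1) :: prefList (x - 1) l := by simp
        simp only [prefList, tot, reduceIte, harr, key, Char.reduceEq]
        ring_nf
      · have key := ih x acc
        simp only [prefList, tot, hb, hb2, reduceIte, key]
        ring_nf

theorem minPref (l : List Char) (x y : Int) (hyx : y ≤ x) :
    List.foldl min y (prefList x l) = min y (x + mn l) := by
  induction l generalizing x y with
  | nil => simp [prefList, mn]; omega
  | cons b l ih =>
    by_cases hb : b = '{'
    · have key := ih (x + 1) (min y (x + 1)) (min_le_right _ _)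
      simp [prefList, mn, hb] at *
      omega
    · by_cases hb2 : b = '}'
      · have key := ih (x - 1) (min y (x - 1)) (min_le_right _ _)
        have hmn := mn_nonpos l
        simp [prefList, mn, hb, hb2] at *
        omega
      · have key := ih x y hyx
        simp [prefList, mn, hb, hb2] at *
        omega

theorem half_eq (n : Nat) :
    PySem.Int.floordiv (n : Int) 2 + PySem.Int.mod (n : Int) 2 =
      PySem.Int.floordiv ((n : Int) + 1) 2 := by
  rw [PySem.Int.floordiv_eq_ediv_of_pos (by omega), PySem.Int.floordiv_eq_ediv_of_pos (by omega),
    PySem.Int.mod_eq_emod_of_pos (by omega)]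
  omega

-- ===== VERDICT (by name: the statement is the Claim_ definition above) =====
theorem solve_spec : Claim_equal_solve := by
  intro s _
  unfold Spec_solve
  set L := s.toList with hL
  -- A's side: counters, then their tot/mn characterisation
  have hA := lemA L 0 0 [] (by simp)
  simp only [List.replicate, List.nil_append, Nat.cast_zero] at hA
  obtain ⟨h1, h2⟩ := runN_char L 0 0
  have hmn := mn_nonpos L
  -- B's side: the prefix list is 0 :: prefList 0 L
  have hfold : L.foldl stepB [0] = (0 : Int) :: prefList 0 L := by
    simpa using foldB L [] 0
  have hlast : PySem.List.pyGet? ((0 : Int) :: prefList 0 L) (-1) = some ((0 : Int) + tot L) := by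
    simpa using lastPref L 0 []
  have hminq : PySem.List.min? ((0 : Int) :: prefList 0 L) (fun x => x) =
      some (List.foldl min 0 (prefList 0 L)) := PySem.List.min?_id_cons 0 (prefList 0 L)
  have hmin : List.foldl min (0 : Int) (prefList 0 L) = mn L := by
    have := minPref L 0 0 le_rfl
    omega
  -- reduce both programs
  simp only [solve, solve_alt, ← hL, hA, hfold, hlast, hminq, hmin, Option.getD_some, zero_add]
  -- identify the two (open, close) arguments and apply half_eq
  have eo : tot L - mn L = ((runN L 0 0).1 : Int) := by omega
  have ec : -mn L = ((runN L 0 0).2 : Int) := by omega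
  rw [eo, ec, ← half_eq, ← half_eq]
  ring
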